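-- pv_equiv track=rewrite | github.com/DancingOnAir/LeetcodePythonSolution | array/2395_find_subarrays_with_equal_sum.py | findSubarrays1
-- ===== SOURCE A (Python) =====
-- from typing import List
--
-- def findSubarrays1(nums: List[int]) -> bool:
--     m = set()
--     for i, val in enumerate(nums):
--         if i > 0:
--             if nums[i - 1] + nums[i] in m:
--                 return True
--             m.add(nums[i - 1] + nums[i])
--     return False
-- ===== SOURCE B (Python) =====
-- from typing import List
--
-- def findSubarrays1(nums: List[int]) -> bool:
--     sums = sorted(x + y for x, y in zip(nums, nums[1:]))
--     for a, b in zip(sums, sums[1:]):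
--         if a == b:
--             return True
--     return False
-- ===== Notes on version B (the rewrite author's own statement) =====
-- stated objective: alternative
-- what changed: Replaces A's hash-set membership loop with a sort-then-scan: sort the adjacent pair sums and look for two equal neighbours, correct because a multiset has a repeated value iff its sorted arrangement has equal adjacent elements.
import Mathlib
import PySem

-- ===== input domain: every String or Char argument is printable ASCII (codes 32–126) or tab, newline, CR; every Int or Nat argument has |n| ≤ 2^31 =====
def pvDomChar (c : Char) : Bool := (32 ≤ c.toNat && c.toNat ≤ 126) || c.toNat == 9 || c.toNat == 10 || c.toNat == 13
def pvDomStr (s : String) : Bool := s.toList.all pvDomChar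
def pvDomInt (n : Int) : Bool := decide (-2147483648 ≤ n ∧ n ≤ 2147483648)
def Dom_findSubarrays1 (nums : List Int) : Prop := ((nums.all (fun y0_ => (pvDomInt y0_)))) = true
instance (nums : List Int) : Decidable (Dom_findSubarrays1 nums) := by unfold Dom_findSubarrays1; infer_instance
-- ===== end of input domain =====

-- B replaces A's hash-set early-exit loop by sort-then-scan: sort the adjacent
-- pair sums and look for two equal neighbours; objective: alternative.

-- ===== PORT A =====
-- the for-loop over enumerate(nums) with seen-set m and early return
def pvGoA (nums : List Int) : List (Int × Int) → PySem.Set Int → Bool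
  | [], _ => false
  | (i, _val) :: rest, m =>
    if i > 0 then
      let s := PySem.List.pyGetD nums (i - 1) 0 + PySem.List.pyGetD nums i 0
      if PySem.Set.contains m s then true
      else pvGoA nums rest (PySem.Set.add m s)
    else pvGoA nums rest m

def findSubarrays1 (nums : List Int) : Bool :=
  pvGoA nums (PySem.List.enumerate nums) PySem.Set.empty

-- ===== PORT B =====
-- the for-loop over zip(sums, sums[1:]) with early return
def pvScanB : List (Int × Int) → Bool
  | [] => false
  | (a, b) :: rest => if a = b then true else pvScanB rest

def findSubarrays1_alt (nums : List Int) : Bool :=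
  let sums := PySem.List.sorted
    (List.zipWith (fun x y => x + y) nums (PySem.List.slice nums (some 1) none))
    (fun x => x) false
  pvScanB (sums.zip sums.tail)

-- ===== PRECONDITION & SPEC =====
def Spec_findSubarrays1 (nums : List Int) (out : Bool) : Prop := out = findSubarrays1_alt nums
instance (nums : List Int) (out : Bool) : Decidable (Spec_findSubarrays1 nums out) := by unfold Spec_findSubarrays1; infer_instance

-- ===== CLAIM (what is proved, stated in full; the proofs are below) =====
def Claim_equal_findSubarrays1 : Prop := ∀ (nums : List Int), Dom_findSubarrays1 nums → Spec_findSubarrays1 nums (findSubarrays1 nums)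

-- ===== LEMMAS AND PROOFS =====

-- the reference seen-set loop over the list of pair sums (characterises A)
def pvLoop : List Int → PySem.Set Int → Bool
  | [], _ => false
  | s :: rest, m =>
    if PySem.Set.contains m s then true else pvLoop rest (PySem.Set.add m s)

theorem pvLoop_iff (l : List Int) : ∀ (m : PySem.Set Int),
    pvLoop l m = true ↔ (∃ s ∈ l, s ∈ m) ∨ ¬ l.Nodup := by
  induction l with
  | nil => intro m; simp [pvLoop]
  | cons s rest ih =>
    intro m
    by_cases hs : s ∈ m
    · simp [pvLoop, hs]
    · simp only [pvLoop]
      rw [if_neg (by simp [hs]), ih]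
      simp only [PySem.Set.mem_add, List.nodup_cons, List.mem_cons, not_and]
      constructor
      · rintro (⟨t, ht, htm | rfl⟩ | hnd)
        · exact Or.inl ⟨t, Or.inr ht, htm⟩
        · exact Or.inr (fun h => absurd (h ht) (by simp))
        · exact Or.inr (fun _ => hnd)
      · rintro (⟨t, (rfl | ht), htm⟩ | hnd)
        · exact absurd htm hs
        · exact Or.inl ⟨t, ht, Or.inl htm⟩
        · by_cases hsr : s ∈ rest
          · exact Or.inl ⟨s, hsr, Or.inr rfl⟩
          · exact Or.inr (fun h => absurd (hnd hsr) (by tauto))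

-- A's indexed loop, started past position 0, is pvLoop over the remaining pair sums
theorem pvGoA_eq_loop (cur : List Int) : ∀ (nums : List Int) (k : Nat) (prev : Int)
    (m : PySem.Set Int), 1 ≤ k → nums[k - 1]? = some prev → nums.drop k = cur →
    pvGoA nums (PySem.List.enumerate cur (k : Int)) m
      = pvLoop (List.zipWith (· + ·) (prev :: cur) cur) m := by
  induction cur with
  | nil => intro nums k prev m hk hprev hcur; simp [pvGoA, pvLoop, PySem.List.enumerate]
  | cons v rest ih =>
    intro nums k prev m hk hprev hcur
    have hkv : nums[k]? = some v := by
      have := congrArg (fun l => l[0]?) hcur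
      simpa using this
    have hk1 : ((k : Int)) > 0 := by exact_mod_cast hk
    have hgp : PySem.List.pyGetD nums ((k : Int) - 1) 0 = prev := by
      have : ((k : Int) - 1) = ((k - 1 : Nat) : Int) := by omega
      rw [this, PySem.List.pyGetD_natCast]
      simp [List.getD, hprev]
    have hgk : PySem.List.pyGetD nums ((k : Int)) 0 = v := by
      rw [PySem.List.pyGetD_natCast]
      simp [List.getD, hkv]
    have hrest : nums.drop (k + 1) = rest := by
      have h := congrArg List.tail hcur
      rwa [List.tail_drop] at h
    have hprev' : nums[(k + 1) - 1]? = some v := by simpa using hkv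
    have hcast : (k : Int) + 1 = ((k + 1 : Nat) : Int) := by push_cast; ring
    simp only [PySem.List.enumerate_cons, pvGoA, if_pos hk1, hgp, hgk,
      List.zipWith_cons_cons, pvLoop]
    rw [hcast, ih nums (k + 1) v _ (by omega) hprev' hrest]

theorem findSubarrays1_eq_loop (nums : List Int) :
    findSubarrays1 nums = pvLoop (List.zipWith (· + ·) nums nums.tail) PySem.Set.empty := by
  cases nums with
  | nil => simp [findSubarrays1, pvGoA, pvLoop, PySem.List.enumerate]
  | cons x rest =>
    have := pvGoA_eq_loop rest (x :: rest) 1 x PySem.Set.empty (by omega) (by simp) (by simp)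
    simp only [findSubarrays1, PySem.List.enumerate_cons, pvGoA]
    norm_num
    simpa using this

-- B's scan over zip(s, s.tail): on a ≤-sorted list it detects exactly a duplicate
theorem pvScanB_iff (s : List Int) (hs : s.Pairwise (· ≤ ·)) :
    pvScanB (s.zip s.tail) = true ↔ ¬ s.Nodup := by
  induction s with
  | nil => simp [pvScanB]
  | cons a rest ih =>
    rw [List.pairwise_cons] at hs
    cases rest with
    | nil => simp [pvScanB]
    | cons b t =>
      by_cases hab : a = b
      · subst hab
        simp [pvScanB, List.nodup_cons]
      · have hnotmem : a ∉ b :: t := by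
          intro hmem
          rcases List.mem_cons.1 hmem with rfl | hmt
          · exact hab rfl
          · have hba : b ≤ a := (List.pairwise_cons.1 hs.2).1 a hmt
            have hab' : a ≤ b := hs.1 b (by simp)
            exact hab (le_antisymm hab' hba)
        simp only [List.tail_cons, List.zip_cons_cons, pvScanB, if_neg hab]
        rw [show (b :: t).zip t = (b :: t).zip (b :: t).tail from rfl, ih hs.2]
        simp [List.nodup_cons, hnotmem]

-- B is the repeated-pair-sum test
theorem alt_eq (nums : List Int) :
    findSubarrays1_alt nums
      = !decide (List.zipWith (· + ·) nums nums.tail).Nodup := by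
  unfold findSubarrays1_alt
  rw [PySem.List.slice_from_one]
  set p := List.zipWith (fun x y => x + y) nums nums.tail with hp
  set s := PySem.List.sorted p (fun x => x) false with hsdef
  have hpair : s.Pairwise (· ≤ ·) := by
    simpa using PySem.List.sorted_pairwise p (fun x => x)
  have hperm : s.Perm p := PySem.List.sorted_perm p (fun x => x) false
  show pvScanB (s.zip s.tail) = !decide (List.zipWith (· + ·) nums nums.tail).Nodup
  have hp2 : List.zipWith (· + ·) nums nums.tail = p := rfl
  rw [hp2, Bool.eq_iff_iff]
  simp only [Bool.not_eq_true', decide_eq_false_iff_not]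
  rw [pvScanB_iff s hpair, hperm.nodup_iff]

-- ===== VERDICT (by name: the statement is the Claim_ definition above) =====
theorem findSubarrays1_spec : Claim_equal_findSubarrays1 := by
  intro nums _
  unfold Spec_findSubarrays1
  rw [findSubarrays1_eq_loop, alt_eq, Bool.eq_iff_iff]
  simp [pvLoop_iff, PySem.Set.empty]
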